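-- pv_equiv track=rewrite | github.com/dpagonis/Teaching | PythonTools/ghs/GHShtml.py | format_hazard_statements
-- ===== SOURCE A (Python) =====
-- def format_hazard_statements(hazard_statements):
--     # Separate the hazard statements into two groups
--     danger_statements = [statement for statement in hazard_statements if "[Danger" in statement]
--     warning_statements = [statement for statement in hazard_statements if "[Warning" in statement]
--
--     # Sort each group if needed (alphabetically in this case, but could be any criteria)
--     danger_statements.sort()
--     warning_statements.sort()
--
--     # Combine the lists with a blank list item as a separator
--     combined_statements = danger_statements + [''] + warning_statements
--
--     # Iterate over the combined list and format with HTML tags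
--     hazard_statements_html = ''.join(
--         f'<li>{statement.replace("[Danger", "[<strong>Danger</strong>").replace("[Warning", "[<strong>Warning</strong>")}</li>'
--         if statement else '<li style="list-style-type:none;">&nbsp;</li>'
--         for statement in combined_statements
--     )
--
--     return hazard_statements_html
-- ===== SOURCE B (Python) =====
-- def _insert_sorted(xs, s):
--     # insert s into the already-sorted list xs (after any equal elements)
--     for i, x in enumerate(xs):
--         if s < x:
--             return xs[:i] + [s] + xs[i:]
--     return xs + [s]
--
--
-- def _item(s):
--     return f'<li>{s.replace("[Danger", "[<strong>Danger</strong>").replace("[Warning", "[<strong>Warning</strong>")}</li>'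
--
--
-- def format_hazard_statements(hazard_statements):
--     # One pass over the input, keeping each group sorted by on-line insertion;
--     # then emit the HTML parts group by group with a fixed separator item.
--     danger, warning = [], []
--     for s in hazard_statements:
--         if "[Danger" in s:
--             danger = _insert_sorted(danger, s)
--         if "[Warning" in s:
--             warning = _insert_sorted(warning, s)
--     parts = [_item(s) for s in danger]
--     parts.append('<li style="list-style-type:none;">&nbsp;</li>')
--     parts.extend(_item(s) for s in warning)
--     return ''.join(parts)
-- ===== Notes on version B (the rewrite author's own statement) =====
-- stated objective: alternative
-- what changed: A builds two filtered lists and sorts each with the library sort; B makes a single pass over the input, maintaining each group as an always-sorted list by on-line sorted insertion, and emits the HTML parts group by group around a fixed separator instead of formatting a combined list with a per-item emptiness test.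
import Mathlib
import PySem

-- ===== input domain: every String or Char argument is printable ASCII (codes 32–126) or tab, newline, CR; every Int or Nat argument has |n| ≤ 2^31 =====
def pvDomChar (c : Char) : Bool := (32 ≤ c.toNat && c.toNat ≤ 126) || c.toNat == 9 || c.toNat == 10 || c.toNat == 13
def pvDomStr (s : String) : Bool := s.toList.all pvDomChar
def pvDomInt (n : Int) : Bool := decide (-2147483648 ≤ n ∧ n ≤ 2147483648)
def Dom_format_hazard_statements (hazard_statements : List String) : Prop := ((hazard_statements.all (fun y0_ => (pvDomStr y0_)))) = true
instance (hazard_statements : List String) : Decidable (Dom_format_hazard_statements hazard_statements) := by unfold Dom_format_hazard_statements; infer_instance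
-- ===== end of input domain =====

-- B replaces A's filter-twice-then-library-sort with a single pass that keeps each
-- group sorted by on-line insertion, and emits the HTML group by group.

-- ===== PORT A =====
-- the f-string body of A's generator: item tag if the statement is truthy, else the blank separator
def pvFmtItemA (s : String) : String :=
  if s == "" then "<li style=\"list-style-type:none;\">&nbsp;</li>"
  else "<li>" ++ PySem.Str.replace (PySem.Str.replace s "[Danger" "[<strong>Danger</strong>") "[Warning" "[<strong>Warning</strong>" ++ "</li>"

def format_hazard_statements (hazard_statements : List String) : String :=
  let danger_statements := hazard_statements.filter (fun s => PySem.Str.isIn "[Danger" s)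
  let warning_statements := hazard_statements.filter (fun s => PySem.Str.isIn "[Warning" s)
  let danger_statements := PySem.List.sorted danger_statements (fun x => x) false
  let warning_statements := PySem.List.sorted warning_statements (fun x => x) false
  let combined_statements := danger_statements ++ [""] ++ warning_statements
  PySem.Str.join "" (combined_statements.map pvFmtItemA)

-- ===== PORT B =====
-- Source B's _insert_sorted: walk the sorted list, insert before the first strictly larger element
def pvInsertSorted (xs : List String) (s : String) : List String :=
  match xs with
  | [] => [s]
  | x :: rest => if s < x then s :: x :: rest else x :: pvInsertSorted rest s

-- Source B's _item
def pvItemB (s : String) : String :=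
  "<li>" ++ PySem.Str.replace (PySem.Str.replace s "[Danger" "[<strong>Danger</strong>") "[Warning" "[<strong>Warning</strong>" ++ "</li>"

def format_hazard_statements_alt (hazard_statements : List String) : String :=
  let dw := hazard_statements.foldl
    (fun (dw : List String × List String) s =>
      let d := if PySem.Str.isIn "[Danger" s then pvInsertSorted dw.1 s else dw.1
      let w := if PySem.Str.isIn "[Warning" s then pvInsertSorted dw.2 s else dw.2
      (d, w)) ([], [])
  let parts := dw.1.map pvItemB
  let parts := parts ++ ["<li style=\"list-style-type:none;\">&nbsp;</li>"]
  let parts := parts ++ dw.2.map pvItemB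
  PySem.Str.join "" parts

-- ===== PRECONDITION & SPEC =====
def Spec_format_hazard_statements (hazard_statements : List String) (out : String) : Prop := out = format_hazard_statements_alt hazard_statements
instance (hazard_statements : List String) (out : String) : Decidable (Spec_format_hazard_statements hazard_statements out) := by unfold Spec_format_hazard_statements; infer_instance

-- ===== CLAIM =====
def Claim_equal_format_hazard_statements : Prop := ∀ (hazard_statements : List String), Dom_format_hazard_statements hazard_statements → Spec_format_hazard_statements hazard_statements (format_hazard_statements hazard_statements)

-- ===== LEMMAS AND PROOFS =====

lemma pvInsertSorted_perm (xs : List String) (s : String) :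
    (pvInsertSorted xs s).Perm (s :: xs) := by
  induction xs with
  | nil => simp [pvInsertSorted]
  | cons x rest ih =>
      unfold pvInsertSorted
      split
      · exact List.Perm.refl _
      · exact (ih.cons x).trans (List.Perm.swap s x rest)

lemma pvInsertSorted_mem {y : String} (xs : List String) (s : String) :
    y ∈ pvInsertSorted xs s ↔ y = s ∨ y ∈ xs := by
  rw [(pvInsertSorted_perm xs s).mem_iff]; simp

lemma pvInsertSorted_pairwise (xs : List String) (s : String)
    (h : xs.Pairwise (· ≤ ·)) : (pvInsertSorted xs s).Pairwise (· ≤ ·) := by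
  induction xs with
  | nil => simp [pvInsertSorted]
  | cons x rest ih =>
      unfold pvInsertSorted
      rcases List.pairwise_cons.mp h with ⟨hx, hrest⟩
      split
      · rename_i hlt
        refine List.pairwise_cons.mpr ⟨?_, h⟩
        intro y hy
        rcases List.mem_cons.mp hy with rfl | hy
        · exact le_of_lt hlt
        · exact le_trans (le_of_lt hlt) (hx y hy)
      · rename_i hnlt
        refine List.pairwise_cons.mpr ⟨?_, ih hrest⟩
        intro y hy
        rcases (pvInsertSorted_mem rest s).mp hy with rfl | hy
        · exact le_of_not_gt hnlt
        · exact hx y hy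

-- the foldl of repeated insertions of ys into acc, as a standalone function
def pvInsAll (acc : List String) (ys : List String) : List String :=
  ys.foldl pvInsertSorted acc

lemma pvInsAll_perm (ys acc : List String) : (pvInsAll acc ys).Perm (acc ++ ys) := by
  induction ys generalizing acc with
  | nil => simp [pvInsAll]
  | cons y ys ih =>
      have h1 : (pvInsAll (pvInsertSorted acc y) ys).Perm (pvInsertSorted acc y ++ ys) := ih _
      have h2 : (pvInsertSorted acc y ++ ys).Perm ((y :: acc) ++ ys) :=
        (pvInsertSorted_perm acc y).append_right ys
      have h3 : ((y :: acc) ++ ys).Perm (acc ++ (y :: ys)) := by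
        simpa using List.perm_middle.symm
      exact (h1.trans h2).trans h3

lemma pvInsAll_pairwise (ys acc : List String) (h : acc.Pairwise (· ≤ ·)) :
    (pvInsAll acc ys).Pairwise (· ≤ ·) := by
  induction ys generalizing acc with
  | nil => simpa [pvInsAll] using h
  | cons y ys ih => exact ih _ (pvInsertSorted_pairwise acc y h)

-- repeated insertion from [] is exactly PySem's sorted with the identity key
lemma pvInsAll_eq_sorted (ys : List String) :
    pvInsAll [] ys = PySem.List.sorted ys (fun x => x) false := by
  apply Eq.symm
  exact PySem.List.sorted_id_eq_of_perm_of_pairwise ys (pvInsAll [] ys)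
    (by simpa using pvInsAll_perm ys [])
    (pvInsAll_pairwise ys [] (by simp))

-- the pair-state foldl splits into two independent insertion folds over the filtered lists
lemma pvLoop_split (p q : String → Bool) (xs : List String) (d w : List String) :
    xs.foldl
      (fun (dw : List String × List String) s =>
        let d := if p s then pvInsertSorted dw.1 s else dw.1
        let w := if q s then pvInsertSorted dw.2 s else dw.2
        (d, w)) (d, w)
    = (pvInsAll d (xs.filter p), pvInsAll w (xs.filter q)) := by
  induction xs generalizing d w with
  | nil => simp [pvInsAll]
  | cons x xs ih =>
      simp only [List.foldl_cons, List.filter_cons]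
      by_cases h1 : p x <;> by_cases h2 : q x <;>
        simp [h1, h2, ih, pvInsAll]

lemma isIn_ne_empty {s : String} (h : PySem.Str.isIn "[Danger" s ∨ PySem.Str.isIn "[Warning" s) :
    (s == "") = false := by
  rcases h with h | h <;>
  · by_contra hne
    have hs : s = "" := by
      cases hb : (s == "") with
      | false => exact absurd hb hne
      | true => exact eq_of_beq hb
    subst hs
    revert h; decide

lemma fmtA_eq_itemB {s : String}
    (h : PySem.Str.isIn "[Danger" s ∨ PySem.Str.isIn "[Warning" s) :
    pvFmtItemA s = pvItemB s := by
  unfold pvFmtItemA pvItemB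
  rw [isIn_ne_empty h]
  simp

-- ===== VERDICT =====
theorem format_hazard_statements_spec : Claim_equal_format_hazard_statements := by
  intro xs _
  unfold Spec_format_hazard_statements format_hazard_statements format_hazard_statements_alt
  rw [pvLoop_split]
  simp only [pvInsAll_eq_sorted]
  have hd : ∀ s ∈ PySem.List.sorted (xs.filter (fun s => PySem.Str.isIn "[Danger" s)) (fun x => x) false,
      pvFmtItemA s = pvItemB s := by
    intro s hs
    exact fmtA_eq_itemB (Or.inl (List.of_mem_filter ((PySem.List.mem_sorted _ _ _ _).mp hs)))
  have hw : ∀ s ∈ PySem.List.sorted (xs.filter (fun s => PySem.Str.isIn "[Warning" s)) (fun x => x) false,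
      pvFmtItemA s = pvItemB s := by
    intro s hs
    exact fmtA_eq_itemB (Or.inr (List.of_mem_filter ((PySem.List.mem_sorted _ _ _ _).mp hs)))
  simp only [List.map_append, List.map_cons, List.map_nil,
    List.map_congr_left hd, List.map_congr_left hw]
  simp [pvFmtItemA, PySem.Str.isIn]
  rfl
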